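-- pv_equiv track=rewrite | github.com/sandeeppai2k/Code-Challenge-Exeter | Web-Scrape.py | Find_Homepg
-- ===== SOURCE A (Python) =====
-- def Find_Homepg(url):     # Finds the home page of a given URL
--     c = 0
--     l = []
--     for s in url:
--         l.append(s)
--         if s == '/':c = c+1
--         if c == 3 :break
--     hp = "".join([str(item) for item in l ])
--
--     return(hp)
-- ===== SOURCE B (Python) =====
-- def Find_Homepg(url):     # Finds the home page of a given URL
--     p1 = url.find('/')
--     if p1 == -1:
--         return url
--     p2 = url.find('/', p1 + 1)
--     if p2 == -1:
--         return url
--     p3 = url.find('/', p2 + 1)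
--     if p3 == -1:
--         return url
--     return url[:p3 + 1]
-- ===== Notes on version B (the rewrite author's own statement) =====
-- stated objective: simpler
-- what changed: Instead of scanning character by character while appending each char to a list, counting slashes and joining, B locates the third slash with three str.find calls and returns a single slice (the whole string when fewer than three slashes exist).
import Mathlib
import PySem

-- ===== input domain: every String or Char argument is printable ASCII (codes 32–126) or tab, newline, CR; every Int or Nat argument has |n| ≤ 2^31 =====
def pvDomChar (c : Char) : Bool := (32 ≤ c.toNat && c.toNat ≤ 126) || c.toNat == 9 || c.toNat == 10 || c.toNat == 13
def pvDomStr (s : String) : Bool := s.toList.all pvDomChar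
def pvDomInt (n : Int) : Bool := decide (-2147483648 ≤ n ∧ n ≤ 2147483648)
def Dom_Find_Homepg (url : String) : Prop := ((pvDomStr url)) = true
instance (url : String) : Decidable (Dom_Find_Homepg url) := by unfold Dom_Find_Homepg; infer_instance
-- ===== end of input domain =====

-- B locates the third '/' with three find calls and slices once, instead of A's
-- char-by-char scan with a counter and list append; objective: simpler.

-- ===== PORT A =====
-- the for-loop of A: l is the appended-to list, c the slash counter, break at c = 3
def goA : List Char → Int → List Char → List Char
  | [], _, l => l
  | s :: rest, c, l =>
    let l' := l ++ [s]
    let c' := if s = '/' then c + 1 else c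
    if c' = 3 then l' else goA rest c' l'

def Find_Homepg (url : String) : String :=
  String.ofList (goA url.toList 0 [])   -- "".join of the chars of l

-- ===== PORT B =====
-- index of the first '/' in cs, or none
def findSlashIdx : List Char → Option Nat
  | [] => none
  | ch :: rest => if ch = '/' then some 0 else (findSlashIdx rest).map (· + 1)

-- Python's url.find('/', start): -1 when absent
def pyFindSlash (cs : List Char) (start : Nat) : Int :=
  match findSlashIdx (cs.drop start) with
  | none => -1
  | some i => ((start + i : Nat) : Int)

def Find_Homepg_alt (url : String) : String :=
  let cs := url.toList
  let p1 := pyFindSlash cs 0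
  if p1 = -1 then url else
  let p2 := pyFindSlash cs (p1.toNat + 1)
  if p2 = -1 then url else
  let p3 := pyFindSlash cs (p2.toNat + 1)
  if p3 = -1 then url else
  String.ofList (cs.take (p3.toNat + 1))   -- url[:p3+1]

-- ===== PRECONDITION & SPEC =====
def Spec_Find_Homepg (url : String) (out : String) : Prop := out = Find_Homepg_alt url
instance (url : String) (out : String) : Decidable (Spec_Find_Homepg url out) := by unfold Spec_Find_Homepg; infer_instance

-- ===== CLAIM (what is proved, stated in full; the proofs are below) =====
def Claim_equal_Find_Homepg : Prop := ∀ (url : String), Dom_Find_Homepg url → Spec_Find_Homepg url (Find_Homepg url)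

-- ===== LEMMAS AND PROOFS =====

-- prefix of cs up to (and including) its k-th '/', or cs itself if it has fewer
def sliceTo (k : Nat) (cs : List Char) : List Char :=
  match findSlashIdx cs with
  | none => cs
  | some p =>
    match k with
    | 0 => cs.take (p + 1)
    | 1 => cs.take (p + 1)
    | k' + 2 => cs.take (p + 1) ++ sliceTo (k' + 1) (cs.drop (p + 1))

theorem findSlashIdx_cons_slash (rest : List Char) :
    findSlashIdx ('/' :: rest) = some 0 := by simp [findSlashIdx]

theorem sliceTo_none (k : Nat) (cs : List Char) (h : findSlashIdx cs = none) :
    sliceTo k cs = cs := by conv_lhs => rw [sliceTo, h]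

theorem sliceTo_one_some (cs : List Char) (p : Nat) (h : findSlashIdx cs = some p) :
    sliceTo 1 cs = cs.take (p + 1) := by conv_lhs => rw [sliceTo, h]

theorem sliceTo_succ2_some (cs : List Char) (p : Nat) (k : Nat)
    (h : findSlashIdx cs = some p) :
    sliceTo (k + 2) cs = cs.take (p + 1) ++ sliceTo (k + 1) (cs.drop (p + 1)) := by
  conv_lhs => rw [sliceTo, h]

theorem sliceTo_cons_ne (s : Char) (rest : List Char) (k : Nat) (hs : s ≠ '/') :
    sliceTo k (s :: rest) = s :: sliceTo k rest := by
  unfold sliceTo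
  simp only [findSlashIdx, if_neg hs]
  cases h : findSlashIdx rest with
  | none => simp
  | some p =>
    match k with
    | 0 => simp [List.take_succ_cons]
    | 1 => simp [List.take_succ_cons]
    | k' + 2 => simp [List.take_succ_cons, List.drop_succ_cons]

theorem sliceTo_one_slash (rest : List Char) :
    sliceTo 1 ('/' :: rest) = ['/'] := by
  rw [sliceTo_one_some ('/' :: rest) 0 (findSlashIdx_cons_slash rest)]; rfl

theorem sliceTo_succ_slash (rest : List Char) (k : Nat) :
    sliceTo (k + 2) ('/' :: rest) = '/' :: sliceTo (k + 1) rest := by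
  rw [sliceTo_succ2_some ('/' :: rest) 0 k (findSlashIdx_cons_slash rest)]
  simp

-- the A loop with slash counter c = 3 - k computes the prefix up to the k-th remaining '/'
theorem goA_eq_sliceTo (cs : List Char) :
    ∀ (k : Nat) (acc : List Char), 1 ≤ k → k ≤ 3 →
      goA cs (3 - (k : Int)) acc = acc ++ sliceTo k cs := by
  induction cs with
  | nil => intro k acc _ _; unfold goA sliceTo; simp [findSlashIdx]
  | cons s rest ih =>
    intro k acc hk1 hk3
    by_cases hs : s = '/'
    · subst hs
      match k, hk1 with
      | 1, _ =>
        unfold goA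
        simp [sliceTo_one_slash]
      | k' + 2, _ =>
        unfold goA
        have hc : (if ('/' : Char) = '/' then (3 : Int) - (↑(k' + 2) : Int) + 1
            else (3 : Int) - (↑(k' + 2) : Int)) = 3 - (↑(k' + 1) : Int) := by
          rw [if_pos rfl]; push_cast; omega
        rw [hc, if_neg (show (3 : Int) - (↑(k' + 1) : Int) ≠ 3 by push_cast; omega)]
        rw [ih (k' + 1) (acc ++ ['/']) (by omega) (by omega), sliceTo_succ_slash]
        simp
    · unfold goA
      simp only [if_neg hs, if_neg (show (3 : Int) - (k : Int) ≠ 3 by omega)]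
      rw [ih k (acc ++ [s]) hk1 hk3, sliceTo_cons_ne s rest k hs]
      simp

-- B's three absolute finds and one slice compute sliceTo 3
theorem alt_eq_sliceTo (url : String) :
    Find_Homepg_alt url = String.ofList (sliceTo 3 url.toList) := by
  simp only [Find_Homepg_alt]
  cases h1 : findSlashIdx url.toList with
  | none =>
    have e1 : pyFindSlash url.toList 0 = -1 := by simp [pyFindSlash, h1]
    rw [e1, if_pos rfl, sliceTo_none 3 _ h1, String.ofList_toList]
  | some p1 =>
    have e1 : pyFindSlash url.toList 0 = ((p1 : Nat) : Int) := by simp [pyFindSlash, h1]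
    rw [e1, if_neg (show ((p1 : Nat) : Int) ≠ -1 by omega), Int.toNat_natCast,
        sliceTo_succ2_some _ p1 1 h1]
    cases h2 : findSlashIdx (url.toList.drop (p1 + 1)) with
    | none =>
      have e2 : pyFindSlash url.toList (p1 + 1) = -1 := by simp [pyFindSlash, h2]
      rw [e2, if_pos rfl, sliceTo_none 2 _ h2, List.take_append_drop, String.ofList_toList]
    | some p2 =>
      have e2 : pyFindSlash url.toList (p1 + 1) = ((p1 + 1 + p2 : Nat) : Int) := by
        simp [pyFindSlash, h2]
      rw [e2, if_neg (show ((p1 + 1 + p2 : Nat) : Int) ≠ -1 by omega), Int.toNat_natCast,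
          sliceTo_succ2_some _ p2 0 h2]
      have hdd : (url.toList.drop (p1 + 1)).drop (p2 + 1)
          = url.toList.drop (p1 + 1 + p2 + 1) := by
        rw [List.drop_drop]; ring_nf
      cases h3 : findSlashIdx (url.toList.drop (p1 + 1 + p2 + 1)) with
      | none =>
        have e3 : pyFindSlash url.toList (p1 + 1 + p2 + 1) = -1 := by
          simp [pyFindSlash, h3]
        rw [e3, if_pos rfl, hdd, sliceTo_none 1 _ h3, ← hdd]
        rw [List.take_append_drop, List.take_append_drop, String.ofList_toList]
      | some p3 =>
        have e3 : pyFindSlash url.toList (p1 + 1 + p2 + 1) = ((p1 + 1 + p2 + 1 + p3 : Nat) : Int) := by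
          simp [pyFindSlash, h3]
        rw [e3, if_neg (show ((p1 + 1 + p2 + 1 + p3 : Nat) : Int) ≠ -1 by omega),
            Int.toNat_natCast, hdd, sliceTo_one_some _ p3 h3]
        rw [← hdd, ← List.take_add, ← List.take_add,
            show p1 + 1 + p2 + 1 + p3 + 1 = p1 + 1 + (p2 + 1 + (p3 + 1)) by omega]

-- ===== VERDICT (by name: the statement is the Claim_ definition above) =====
theorem Find_Homepg_spec : Claim_equal_Find_Homepg := by
  intro url _
  show Find_Homepg url = Find_Homepg_alt url
  unfold Find_Homepg
  rw [alt_eq_sliceTo]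
  have := goA_eq_sliceTo url.toList 3 [] (by omega) (by omega)
  norm_num at this
  rw [this]
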